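-- pv_equiv track=rewrite | github.com/forthcoming/algorithm | leet_code.py | leet_code_17
-- ===== SOURCE A (Python) =====
-- def leet_code_17(sites):  # 快递业务站(也可以并查集,初始状态每个站点作为一个跟节点)
--     count = 0
--     cover = set()
--     length = len(sites)
--     for i in range(length):
--         if i not in cover:
--             count += 1
--         site = sites[i]
--         for j in range(i, length):  # 对称矩阵,减少遍历次数
--             if site[j] == 1:
--                 cover.add(j)
--     return count
-- ===== SOURCE B (Python) =====
-- def leet_code_17(sites):
--     count = 0
--     for i in range(len(sites)):
--         if not any(sites[k][i] == 1 for k in range(i)):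
--             count += 1
--     return count
-- ===== Notes on version B (the rewrite author's own statement) =====
-- stated objective: simpler
-- what changed: Drops the maintained cover set: instead of marking covered columns forward into a set, each station i directly scans its own column upward (sites[k][i] for k < i) to decide whether an earlier station already covers it.
import Mathlib
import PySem

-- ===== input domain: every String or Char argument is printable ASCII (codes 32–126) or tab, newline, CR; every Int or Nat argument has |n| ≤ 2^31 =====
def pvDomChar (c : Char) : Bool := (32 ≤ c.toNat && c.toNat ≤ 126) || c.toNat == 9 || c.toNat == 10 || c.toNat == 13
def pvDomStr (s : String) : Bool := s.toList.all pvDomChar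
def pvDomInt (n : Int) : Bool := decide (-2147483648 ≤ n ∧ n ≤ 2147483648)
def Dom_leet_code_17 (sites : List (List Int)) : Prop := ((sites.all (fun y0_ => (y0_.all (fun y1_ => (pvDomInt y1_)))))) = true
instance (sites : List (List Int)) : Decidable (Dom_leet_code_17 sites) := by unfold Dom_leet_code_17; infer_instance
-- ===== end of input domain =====

-- B removes A's maintained cover set: each station i scans its own column against the earlier rows instead (simpler; return-value equivalence).

-- ===== PORT A =====
-- inner loop body: 'if site[j] == 1: cover.add(j)'
def pvAInner (site : List Int) (c : PySem.Set Int) (j : Int) : PySem.Set Int :=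
  if PySem.List.pyGetD site j 0 = 1 then PySem.Set.add c j else c

-- outer loop body over state (count, cover)
def pvAStep (sites : List (List Int)) (length : Int) (st : Int × PySem.Set Int) (i : Int) :
    Int × PySem.Set Int :=
  let count := if PySem.Set.contains st.2 i then st.1 else st.1 + 1
  let site := PySem.List.pyGetD sites i []
  (count, (PySem.List.pyRange i length 1).foldl (pvAInner site) st.2)

def leet_code_17 (sites : List (List Int)) : Int :=
  ((PySem.List.pyRange 0 (sites.length : Int) 1).foldl
    (pvAStep sites (sites.length : Int)) (0, PySem.Set.empty)).1

-- ===== PORT B =====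
-- loop body: 'if not any(sites[k][i] == 1 for k in range(i)): count += 1'
def pvBStep (sites : List (List Int)) (count : Int) (i : Int) : Int :=
  if (PySem.List.pyRange 0 i 1).any
      (fun k => PySem.List.pyGetD (PySem.List.pyGetD sites k []) i 0 == 1)
  then count else count + 1

def leet_code_17_alt (sites : List (List Int)) : Int :=
  (PySem.List.pyRange 0 (sites.length : Int) 1).foldl (pvBStep sites) 0

-- ===== PRECONDITION & SPEC =====
-- Pre_ excludes exactly the inputs where Python A raises IndexError: some row shorter than the matrix
def Pre_leet_code_17 (sites : List (List Int)) : Prop :=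
  ∀ row ∈ sites, sites.length ≤ row.length
instance (sites : List (List Int)) : Decidable (Pre_leet_code_17 sites) := by
  unfold Pre_leet_code_17; infer_instance

def pvWitness_leet_code_17 : List (List Int) := [[0, 1], [1, 0]]

def Spec_leet_code_17 (sites : List (List Int)) (out : Int) : Prop := out = leet_code_17_alt sites
instance (sites : List (List Int)) (out : Int) : Decidable (Spec_leet_code_17 sites out) := by unfold Spec_leet_code_17; infer_instance

-- ===== CLAIM (what is proved, stated in full; the proofs are below) =====
def Claim_equal_leet_code_17 : Prop := ∀ (sites : List (List Int)), Dom_leet_code_17 sites → Pre_leet_code_17 sites → Spec_leet_code_17 sites (leet_code_17 sites)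

-- ===== LEMMAS AND PROOFS =====

-- membership in the cover set after processing one row
theorem mem_foldl_pvAInner (site : List Int) :
    ∀ (L : List Int) (c : PySem.Set Int) (j : Int),
      j ∈ L.foldl (pvAInner site) c ↔ j ∈ c ∨ (j ∈ L ∧ PySem.List.pyGetD site j 0 = 1) := by
  intro L
  induction L with
  | nil => simp
  | cons x xs ih =>
    intro c j
    simp only [List.foldl_cons, pvAInner]
    split_ifs with h
    · rw [ih, PySem.Set.mem_add]
      constructor
      · rintro ((hc | rfl) | hx)
        · exact Or.inl hc
        · exact Or.inr ⟨List.mem_cons_self, h⟩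
        · exact Or.inr ⟨List.mem_cons_of_mem _ hx.1, hx.2⟩
      · rintro (hc | ⟨hm, hp⟩)
        · exact Or.inl (Or.inl hc)
        · rcases List.mem_cons.mp hm with rfl | hm
          · exact Or.inl (Or.inr rfl)
          · exact Or.inr ⟨hm, hp⟩
    · rw [ih]
      constructor
      · rintro (hc | hx)
        · exact Or.inl hc
        · exact Or.inr ⟨List.mem_cons_of_mem _ hx.1, hx.2⟩
      · rintro (hc | ⟨hm, hp⟩)
        · exact Or.inl hc
        · rcases List.mem_cons.mp hm with rfl | hm
          · exact absurd hp h
          · exact Or.inr ⟨hm, hp⟩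

-- main invariant: the two folds produce the same count, given that the cover set
-- holds exactly the columns marked by the rows already processed
theorem pv_outer (sites : List (List Int)) (n : Int) (hn : n = (sites.length : Int)) :
    ∀ (d : Nat) (m : Int), m + d = n → 0 ≤ m →
      ∀ (cnt : Int) (c : PySem.Set Int),
        (∀ j : Int, j ∈ c ↔ ∃ k : Int, 0 ≤ k ∧ k < m ∧ k ≤ j ∧ j < n ∧
            PySem.List.pyGetD (PySem.List.pyGetD sites k []) j 0 = 1) →
        ((PySem.List.pyRange m n 1).foldl (pvAStep sites n) (cnt, c)).1
          = (PySem.List.pyRange m n 1).foldl (pvBStep sites) cnt := by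
  intro d
  induction d with
  | zero =>
    intro m hm _ cnt c _
    have hmn : n ≤ m := by omega
    rw [PySem.List.pyRange_one_eq_nil hmn]
    rfl
  | succ d ih =>
    intro m hm h0 cnt c hc
    have hlt : m < n := by omega
    rw [PySem.List.pyRange_one_cons hlt]
    simp only [List.foldl_cons]
    -- the two tests agree
    have htest : PySem.Set.contains c m
        = (PySem.List.pyRange 0 m 1).any
            (fun k => PySem.List.pyGetD (PySem.List.pyGetD sites k []) m 0 == 1) := by
      by_cases hmem : m ∈ c
      · have := (hc m).mp hmem
        rcases this with ⟨k, hk0, hkm, _, _, he⟩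
        have hany : (PySem.List.pyRange 0 m 1).any
            (fun k => PySem.List.pyGetD (PySem.List.pyGetD sites k []) m 0 == 1) = true := by
          rw [List.any_eq_true]
          exact ⟨k, PySem.List.mem_pyRange_one.mpr ⟨hk0, hkm⟩, beq_iff_eq.mpr he⟩
        rw [hany, (PySem.Set.contains_iff c m).mpr hmem]
      · have hany : (PySem.List.pyRange 0 m 1).any
            (fun k => PySem.List.pyGetD (PySem.List.pyGetD sites k []) m 0 == 1) = false := by
          rw [Bool.eq_false_iff, Ne, List.any_eq_true]
          rintro ⟨k, hk, he⟩
          rcases PySem.List.mem_pyRange_one.mp hk with ⟨hk0, hkm⟩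
          exact hmem ((hc m).mpr ⟨k, hk0, hkm, le_of_lt hkm, hlt, beq_iff_eq.mp he⟩)
        rw [hany]
        simp only [Bool.eq_false_iff, Ne, PySem.Set.contains_iff]
        exact hmem
    have hstep : pvAStep sites n (cnt, c) m
        = (pvBStep sites cnt m,
           (PySem.List.pyRange m n 1).foldl (pvAInner (PySem.List.pyGetD sites m [])) c) := by
      simp only [pvAStep, pvBStep, htest]
    rw [hstep]
    apply ih (m + 1) (by omega) (by omega)
    intro j
    rw [mem_foldl_pvAInner, hc j]
    constructor
    · rintro (⟨k, hk0, hkm, hkj, hjn, he⟩ | ⟨hjr, he⟩)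
      · exact ⟨k, hk0, by omega, hkj, hjn, he⟩
      · rcases PySem.List.mem_pyRange_one.mp hjr with ⟨hmj, hjn⟩
        exact ⟨m, h0, by omega, hmj, hjn, he⟩
    · rintro ⟨k, hk0, hkm1, hkj, hjn, he⟩
      by_cases hkm : k < m
      · exact Or.inl ⟨k, hk0, hkm, hkj, hjn, he⟩
      · have : k = m := by omega
        subst this
        exact Or.inr ⟨PySem.List.mem_pyRange_one.mpr ⟨hkj, hjn⟩, he⟩

-- ===== VERDICT (by name: the statement is the Claim_ definition above) =====
theorem leet_code_17_spec : Claim_equal_leet_code_17 := by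
  intro sites _ _
  unfold Spec_leet_code_17 leet_code_17 leet_code_17_alt
  apply pv_outer sites (sites.length : Int) rfl sites.length 0 (by omega) le_rfl
  intro j
  simp [PySem.Set.empty]
  intro x h1 h2
  omega
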